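-- pv_equiv track=rewrite | github.com/abubakirov06/Practice-Week-4 | problem5.py | is_valid_binary
-- ===== SOURCE A (Python) =====
-- def is_valid_binary(binary_str):
--     j = 0
--     for i in binary_str:
--         if i == '0' or i == '1':
--             j += 0
--         else:
--             j += 1
--
--     if j == 0:
--         return True
--     else:
--         return False
-- ===== SOURCE B (Python) =====
-- def is_valid_binary(binary_str):
--     return set(binary_str) <= {'0', '1'}
-- ===== Notes on version B (the rewrite author's own statement) =====
-- stated objective: simpler
-- what changed: Replaces the per-character counting loop and final j==0 branch with a one-line set-algebra test: build the set of distinct characters and check it is a subset of the set of binary digits.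
import Mathlib
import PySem

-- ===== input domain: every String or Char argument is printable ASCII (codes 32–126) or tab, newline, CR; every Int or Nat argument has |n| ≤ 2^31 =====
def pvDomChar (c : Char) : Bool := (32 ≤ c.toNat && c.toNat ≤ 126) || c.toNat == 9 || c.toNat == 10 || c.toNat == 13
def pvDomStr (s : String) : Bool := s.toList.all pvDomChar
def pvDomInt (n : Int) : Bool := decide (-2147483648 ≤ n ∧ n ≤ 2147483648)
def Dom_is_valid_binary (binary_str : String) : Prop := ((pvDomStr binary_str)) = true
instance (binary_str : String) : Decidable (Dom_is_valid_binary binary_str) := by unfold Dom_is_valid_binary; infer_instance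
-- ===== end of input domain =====

-- ===== PORT A =====
-- B: one-line set-algebra test (set of distinct chars ⊆ {'0','1'}) instead of A's counting loop.
def is_valid_binary (binary_str : String) : Bool :=
  let j := binary_str.toList.foldl
    (fun j i => if i = '0' ∨ i = '1' then j + 0 else j + 1) (0 : Int)
  if j = 0 then true else false

-- ===== PORT B =====
def is_valid_binary_alt (binary_str : String) : Bool :=
  PySem.Set.issubset (PySem.Set.ofList binary_str.toList) ['0', '1']

-- ===== PRECONDITION & SPEC =====
def Spec_is_valid_binary (binary_str : String) (out : Bool) : Prop := out = is_valid_binary_alt binary_str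
instance (binary_str : String) (out : Bool) : Decidable (Spec_is_valid_binary binary_str out) := by unfold Spec_is_valid_binary; infer_instance

-- ===== CLAIM (what is proved, stated in full; the proofs are below) =====
def Claim_equal_is_valid_binary : Prop := ∀ (binary_str : String), Dom_is_valid_binary binary_str → Spec_is_valid_binary binary_str (is_valid_binary binary_str)

-- ===== LEMMAS AND PROOFS =====

-- ===== VERDICT (by name: the statement is the Claim_ definition above) =====
theorem foldl_count_bad (l : List Char) (j : Int) :
    l.foldl (fun j i => if i = '0' ∨ i = '1' then j + 0 else j + 1) j
      = j + l.countP (fun i => !(i = '0' ∨ i = '1' : Bool)) := by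
  induction l generalizing j with
  | nil => simp
  | cons a l ih =>
    simp only [List.foldl_cons, List.countP_cons, ih]
    by_cases h : a = '0' ∨ a = '1' <;> simp [h] <;> ring

theorem is_valid_binary_spec : Claim_equal_is_valid_binary := by
  intro s _
  unfold Spec_is_valid_binary is_valid_binary is_valid_binary_alt
  simp only [foldl_count_bad, Int.zero_add]
  by_cases h : s.toList.countP (fun i => !(i = '0' ∨ i = '1' : Bool)) = 0
  · rw [h]
    norm_num [PySem.Set.issubset_iff, PySem.Set.mem_ofList]
    intro x hx
    rw [List.countP_eq_zero] at h
    have := h x hx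
    simp at this
    tauto
  · rw [if_neg (by exact_mod_cast h)]
    symm
    rw [Bool.eq_false_iff]
    intro hb
    rw [PySem.Set.issubset_iff] at hb
    apply h
    rw [List.countP_eq_zero]
    intro x hx
    have := hb x (by rw [PySem.Set.mem_ofList]; exact hx)
    simp at this ⊢
    tauto
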